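-- pv_equiv track=rewrite | github.com/xmujin/CLP-Recognition | src/character_split.py | FindVSplitPos
-- ===== SOURCE A (Python) =====
-- def FindVSplitPos(v, threshold=800, width=1, charctorWidth=5):
--     starts = []
--     ends = []
--     # 双指针法
--     l = 0
--     r = 0
--     while r < len(v):
--         if v[r] >= threshold:
--             # 移动右指针
--             r += 1
--         else:  # 如果小于阈值，确定是否满足分割条件
--             temp = r
--             count = 0  # 保存0的个数
--             while v[temp] < threshold:  # 结束时，temp已经指向了不为0的位置
--                 count += 1
--                 temp += 1
--                 if temp >= len(v):
--                     break
--             if count >= width: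
--                 if r - l >= charctorWidth:
--                     starts.append(l)
--                     ends.append(r)
--                 l = r + count  # 重新定位左指针的位置
--                 r = l
--             else:  # 如果谷值的个数少于预定值，表明结束位置还未确定，将右指针移动到不为0的位置
--                 r += count
--     if r - l >= charctorWidth:
--         starts.append(l)
--         ends.append(r)
--     return [starts, ends]
-- ===== SOURCE B (Python) =====
-- def FindVSplitPos(v, threshold=800, width=1, charctorWidth=5):
--     n = len(v)
--     # run-length encode v into maximal runs (start, length, below_threshold)
--     runs = []
--     i = 0
--     while i < n:
--         below = v[i] < threshold
--         j = i
--         while j < n and (v[j] < threshold) == below: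
--             j += 1
--         runs.append((i, j - i, below))
--         i = j
--     # reduce: each long-enough below-run ends the current segment at its start
--     starts = []
--     ends = []
--     l = 0
--     for s, length, below in runs:
--         if below and length >= width:
--             if s - l >= charctorWidth:
--                 starts.append(l)
--                 ends.append(s)
--             l = s + length
--     if n - l >= charctorWidth:
--         starts.append(l)
--         ends.append(n)
--     return [starts, ends]
-- ===== Notes on version B (the rewrite author's own statement) =====
-- stated objective: alternative
-- what changed: Replaces A's interleaved two-pointer scan (with an inner loop that re-counts each below-threshold valley) by a run-length encoding of v into maximal above/below runs followed by a single reduction over the runs that cuts segments at long-enough below-runs.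
import Mathlib
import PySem

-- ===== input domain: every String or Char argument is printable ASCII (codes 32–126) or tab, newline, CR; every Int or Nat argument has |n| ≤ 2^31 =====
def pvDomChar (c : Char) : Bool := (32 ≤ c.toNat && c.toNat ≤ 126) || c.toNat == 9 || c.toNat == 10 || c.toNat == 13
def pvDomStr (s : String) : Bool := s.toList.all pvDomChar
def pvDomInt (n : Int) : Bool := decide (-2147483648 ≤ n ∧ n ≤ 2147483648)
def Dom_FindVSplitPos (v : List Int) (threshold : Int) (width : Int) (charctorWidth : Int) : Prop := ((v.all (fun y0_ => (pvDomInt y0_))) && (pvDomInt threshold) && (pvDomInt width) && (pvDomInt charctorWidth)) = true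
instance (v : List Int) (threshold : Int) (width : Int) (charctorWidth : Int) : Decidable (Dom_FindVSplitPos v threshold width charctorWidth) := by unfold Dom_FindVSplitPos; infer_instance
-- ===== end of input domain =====

-- B replaces A's interleaved two-pointer scan by a run-length encoding of v followed by a
-- single reduction over the runs (objective: alternative decomposition, same cost).
-- Loops are ported with a fuel argument (structural recursion); the fuel is a totality
-- guard only, always supplied large enough to never run out.

-- ===== PORT A =====
-- inner while loop of A: length of the below-threshold run starting at temp
def pvRunLen (v : List Int) (threshold : Int) : Nat → Nat → Nat
  | 0, _ => 0
  | fuel + 1, temp =>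
    if h : temp < v.length then
      if v[temp] < threshold then pvRunLen v threshold fuel (temp + 1) + 1 else 0
    else 0

-- outer while loop of A, state (l, r, starts, ends)
def pvLoopA (v : List Int) (threshold width charctorWidth : Int) :
    Nat → Nat → Nat → List Int → List Int → List Int × List Int
  | 0, _, _, starts, ends => (starts, ends)
  | fuel + 1, l, r, starts, ends =>
    if h : r < v.length then
      if v[r] ≥ threshold then
        pvLoopA v threshold width charctorWidth fuel l (r + 1) starts ends
      else
        let count := pvRunLen v threshold (v.length - r) r
        if (count : Int) ≥ width then
          if (r : Int) - (l : Int) ≥ charctorWidth then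
            pvLoopA v threshold width charctorWidth fuel (r + count) (r + count)
              (starts ++ [(l : Int)]) (ends ++ [(r : Int)])
          else
            pvLoopA v threshold width charctorWidth fuel (r + count) (r + count) starts ends
        else
          pvLoopA v threshold width charctorWidth fuel l (r + count) starts ends
    else
      if (r : Int) - (l : Int) ≥ charctorWidth then (starts ++ [(l : Int)], ends ++ [(r : Int)])
      else (starts, ends)

def FindVSplitPos (v : List Int) (threshold : Int) (width : Int) (charctorWidth : Int) : List (List Int) :=
  let p := pvLoopA v threshold width charctorWidth (v.length + 1) 0 0 [] []
  [p.1, p.2]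

-- ===== PORT B =====
-- inner while loop of B: first j ≥ i with j = n or (v[j] < threshold) ≠ below
def pvScanEnd (v : List Int) (threshold : Int) (below : Bool) : Nat → Nat → Nat
  | 0, j => j
  | fuel + 1, j =>
    if h : j < v.length then
      if decide (v[j] < threshold) = below then pvScanEnd v threshold below fuel (j + 1) else j
    else j

-- run-length encoding loop of B: maximal runs (start, length, below) from index i
def pvRuns (v : List Int) (threshold : Int) : Nat → Nat → List (Nat × Nat × Bool)
  | 0, _ => []
  | fuel + 1, i =>
    if h : i < v.length then
      let j := pvScanEnd v threshold (decide (v[i] < threshold)) (v.length - i) i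
      (i, j - i, decide (v[i] < threshold)) :: pvRuns v threshold fuel j
    else []

-- reduction loop of B over the runs, state (l, starts, ends)
def pvProcRuns (width charctorWidth : Int) (runs : List (Nat × Nat × Bool))
    (l : Nat) (starts ends : List Int) : Nat × List Int × List Int :=
  match runs with
  | [] => (l, starts, ends)
  | (s, len, below) :: rest =>
    if below ∧ (len : Int) ≥ width then
      if (s : Int) - (l : Int) ≥ charctorWidth then
        pvProcRuns width charctorWidth rest (s + len) (starts ++ [(l : Int)]) (ends ++ [(s : Int)])
      else
        pvProcRuns width charctorWidth rest (s + len) starts ends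
    else
      pvProcRuns width charctorWidth rest l starts ends

def FindVSplitPos_alt (v : List Int) (threshold : Int) (width : Int) (charctorWidth : Int) : List (List Int) :=
  let n := v.length
  let q := pvProcRuns width charctorWidth (pvRuns v threshold (n + 1) 0) 0 [] []
  if (n : Int) - (q.1 : Int) ≥ charctorWidth then [q.2.1 ++ [(q.1 : Int)], q.2.2 ++ [(n : Int)]]
  else [q.2.1, q.2.2]

-- ===== PRECONDITION & SPEC =====
def Spec_FindVSplitPos (v : List Int) (threshold : Int) (width : Int) (charctorWidth : Int) (out : List (List Int)) : Prop := out = FindVSplitPos_alt v threshold width charctorWidth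
instance (v : List Int) (threshold : Int) (width : Int) (charctorWidth : Int) (out : List (List Int)) : Decidable (Spec_FindVSplitPos v threshold width charctorWidth out) := by unfold Spec_FindVSplitPos; infer_instance

-- ===== CLAIM (what is proved, stated in full; the proofs are below) =====
def Claim_equal_FindVSplitPos : Prop := ∀ (v : List Int) (threshold : Int) (width : Int) (charctorWidth : Int), Dom_FindVSplitPos v threshold width charctorWidth → Spec_FindVSplitPos v threshold width charctorWidth (FindVSplitPos v threshold width charctorWidth)

-- ===== LEMMAS AND PROOFS =====

theorem pvScanEnd_stop_len (v : List Int) (threshold : Int) (b : Bool) (f j : Nat)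
    (h : v.length ≤ j) : pvScanEnd v threshold b f j = j := by
  cases f with
  | zero => rfl
  | succ f => rw [pvScanEnd, dif_neg (by omega)]

theorem pvScanEnd_stop_cond (v : List Int) (threshold : Int) (b : Bool) (f j : Nat)
    (h : j < v.length) (hb : decide (v[j] < threshold) ≠ b) : pvScanEnd v threshold b f j = j := by
  cases f with
  | zero => rfl
  | succ f => rw [pvScanEnd, dif_pos h, if_neg hb]

theorem pvScanEnd_ge (v : List Int) (threshold : Int) (b : Bool) (f : Nat) :
    ∀ j, j ≤ pvScanEnd v threshold b f j := by
  induction f with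
  | zero => intro j; simp [pvScanEnd]
  | succ f ih =>
    intro j
    rw [pvScanEnd]
    split
    · split
      · have := ih (j + 1); omega
      · omega
    · omega

theorem pvScanEnd_le (v : List Int) (threshold : Int) (b : Bool) (f : Nat) :
    ∀ j, j ≤ v.length → pvScanEnd v threshold b f j ≤ v.length := by
  induction f with
  | zero => intro j hj; simpa [pvScanEnd] using hj
  | succ f ih =>
    intro j hj
    rw [pvScanEnd]
    split
    · split
      · exact ih (j + 1) (by omega)
      · omega
    · omega

theorem pvScanEnd_gt (v : List Int) (threshold : Int) (b : Bool) (f i : Nat)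
    (h : i < v.length) (hb : decide (v[i] < threshold) = b) (hf : 0 < f) :
    i < pvScanEnd v threshold b f i := by
  cases f with
  | zero => omega
  | succ f =>
    rw [pvScanEnd, dif_pos h, if_pos hb]
    have := pvScanEnd_ge v threshold b f (i + 1); omega

theorem pvScanEnd_true_eq (v : List Int) (threshold : Int) (f : Nat) :
    ∀ i, pvScanEnd v threshold true f i = i + pvRunLen v threshold f i := by
  induction f with
  | zero => intro i; simp [pvScanEnd, pvRunLen]
  | succ f ih =>
    intro i
    rw [pvScanEnd, pvRunLen]
    by_cases h : i < v.length
    · rw [dif_pos h, dif_pos h]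
      by_cases hlt : v[i] < threshold
      · rw [if_pos (by simpa using hlt), if_pos hlt]
        have := ih (i + 1); omega
      · rw [if_neg (by simpa using hlt), if_neg hlt]; omega
    · rw [dif_neg h, dif_neg h]; omega

theorem pvRunLen_pos (v : List Int) (threshold : Int) (f i : Nat) (h : i < v.length)
    (hlt : v[i] < threshold) (hf : 0 < f) : 1 ≤ pvRunLen v threshold f i := by
  cases f with
  | zero => omega
  | succ f => rw [pvRunLen, dif_pos h, if_pos hlt]; omega

theorem pvRunLen_le (v : List Int) (threshold : Int) (f : Nat) :
    ∀ i, i ≤ v.length → i + pvRunLen v threshold f i ≤ v.length := by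
  induction f with
  | zero => intro i hi; simpa [pvRunLen] using hi
  | succ f ih =>
    intro i hi
    rw [pvRunLen]
    split
    · split
      · have := ih (i + 1) (by omega); omega
      · omega
    · omega

theorem pvRuns_irrel (v : List Int) (threshold : Int) (f1 : Nat) :
    ∀ f2 i, v.length ≤ i + f1 → v.length ≤ i + f2 →
      pvRuns v threshold f1 i = pvRuns v threshold f2 i := by
  induction f1 with
  | zero =>
    intro f2 i h1 _
    cases f2 with
    | zero => rfl
    | succ f2 => rw [pvRuns, pvRuns, dif_neg (by omega)]
  | succ f1 ih =>
    intro f2 i h1 h2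
    by_cases hi : i < v.length
    · cases f2 with
      | zero => omega
      | succ f2 =>
        rw [pvRuns, pvRuns, dif_pos hi, dif_pos hi]
        have hgt : i < pvScanEnd v threshold (decide (v[i] < threshold)) (v.length - i) i :=
          pvScanEnd_gt v threshold _ _ i hi rfl (by omega)
        exact congrArg _ (ih f2 _ (by omega) (by omega))
    · cases f2 with
      | zero => rw [pvRuns, pvRuns, dif_neg hi]
      | succ f2 => rw [pvRuns, pvRuns, dif_neg hi, dif_neg hi]

-- main invariant: A's loop equals B's reduction over the remaining runs plus the final flush
theorem pvMain (v : List Int) (threshold width charctorWidth : Int) (F : Nat) :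
    ∀ r l starts ends, r ≤ v.length → v.length < r + F →
    pvLoopA v threshold width charctorWidth F l r starts ends =
      (let q := pvProcRuns width charctorWidth (pvRuns v threshold (v.length + 1 - r) r) l starts ends
       if ((v.length : Int) - (q.1 : Int) ≥ charctorWidth) then
         (q.2.1 ++ [(q.1 : Int)], q.2.2 ++ [(v.length : Int)])
       else (q.2.1, q.2.2)) := by
  induction F with
  | zero => intro r l starts ends hr hF; omega
  | succ F ih =>
    intro r l starts ends hr hF
    rw [pvLoopA]
    by_cases h : r < v.length
    · rw [dif_pos h]
      have hsplit : v.length + 1 - r = (v.length - r - 1) + 1 + 1 := by omega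
      by_cases hge : v[r] ≥ threshold
      · rw [if_pos hge]
        have hb : decide (v[r] < threshold) = false := by simp; omega
        -- unfold the head run (an above-run) on the RHS and let the reduction skip it
        rw [ih (r + 1) l starts ends (by omega) (by omega)]
        have hL : pvRuns v threshold (v.length + 1 - r) r =
            (r, pvScanEnd v threshold false (v.length - r) r - r, false) ::
              pvRuns v threshold ((v.length - r - 1) + 1) (pvScanEnd v threshold false (v.length - r) r) := by
          rw [hsplit, pvRuns, dif_pos h, hb]
        have hstep : pvScanEnd v threshold false (v.length - r) r =
            pvScanEnd v threshold false (v.length - r - 1) (r + 1) := by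
          have heq : v.length - r = (v.length - r - 1) + 1 := by omega
          rw [heq, pvScanEnd, dif_pos h, if_pos hb]
          simp
        rw [hL]
        simp only [pvProcRuns, Bool.false_eq_true, false_and, if_false]
        -- compare the two tails
        by_cases h1 : r + 1 < v.length
        · by_cases hge1 : v[r + 1] ≥ threshold
          · -- next element also above: the run from r+1 is the same above-run, also skipped
            have hb1 : decide (v[r + 1] < threshold) = false := by simp; omega
            have hR : pvRuns v threshold (v.length + 1 - (r + 1)) (r + 1) =
                (r + 1, pvScanEnd v threshold false (v.length - (r + 1)) (r + 1) - (r + 1), false) ::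
                  pvRuns v threshold (v.length - r - 1) (pvScanEnd v threshold false (v.length - (r + 1)) (r + 1)) := by
              have : v.length + 1 - (r + 1) = (v.length - r - 1) + 1 := by omega
              rw [this, pvRuns, dif_pos h1, hb1]
            rw [hR]
            simp only [pvProcRuns, Bool.false_eq_true, false_and, if_false]
            have hf : v.length - (r + 1) = v.length - r - 1 := by omega
            rw [hstep, hf]
            have hj : r + 1 < pvScanEnd v threshold false (v.length - r - 1) (r + 1) :=
              pvScanEnd_gt v threshold false _ (r + 1) h1 hb1 (by omega)
            have hjle : pvScanEnd v threshold false (v.length - r - 1) (r + 1) ≤ v.length :=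
              pvScanEnd_le v threshold false _ (r + 1) (by omega)
            rw [pvRuns_irrel v threshold ((v.length - r - 1) + 1) (v.length - r - 1) _ (by omega) (by omega)]
          · -- the above-run ends right after r: both sides continue at r+1
            have hb1 : decide (v[r + 1] < threshold) = true := by simp; omega
            rw [hstep, pvScanEnd_stop_cond v threshold false _ (r + 1) h1 (by rw [hb1]; simp)]
            rw [pvRuns_irrel v threshold ((v.length - r - 1) + 1) (v.length + 1 - (r + 1)) (r + 1) (by omega) (by omega)]
        · -- r+1 = length: run ends at the end of the vector
          rw [hstep, pvScanEnd_stop_len v threshold false _ (r + 1) (by omega)]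
          rw [pvRuns_irrel v threshold ((v.length - r - 1) + 1) (v.length + 1 - (r + 1)) (r + 1) (by omega) (by omega)]
      · rw [if_neg hge]
        have hlt : v[r] < threshold := by omega
        have hb : decide (v[r] < threshold) = true := by simpa using hlt
        have hpos : 1 ≤ pvRunLen v threshold (v.length - r) r :=
          pvRunLen_pos v threshold _ r h hlt (by omega)
        have hle : r + pvRunLen v threshold (v.length - r) r ≤ v.length :=
          pvRunLen_le v threshold _ r (by omega)
        have hL : pvRuns v threshold (v.length + 1 - r) r =
            (r, pvRunLen v threshold (v.length - r) r, true) ::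
              pvRuns v threshold ((v.length - r - 1) + 1) (r + pvRunLen v threshold (v.length - r) r) := by
          rw [hsplit, pvRuns, dif_pos h, hb, pvScanEnd_true_eq]
          simp only [Nat.add_sub_cancel_left]
        rw [hL]
        simp only [pvProcRuns, true_and]
        rw [pvRuns_irrel v threshold ((v.length - r - 1) + 1)
          (v.length + 1 - (r + pvRunLen v threshold (v.length - r) r))
          (r + pvRunLen v threshold (v.length - r) r) (by omega) (by omega)]
        by_cases hw : ((pvRunLen v threshold (v.length - r) r : Nat) : Int) ≥ width
        · simp only [if_pos hw]
          by_cases hc : (r : Int) - (l : Int) ≥ charctorWidth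
          · simp only [if_pos hc]
            rw [ih (r + pvRunLen v threshold (v.length - r) r) (r + pvRunLen v threshold (v.length - r) r)
              (starts ++ [(l : Int)]) (ends ++ [(r : Int)]) hle (by omega)]
          · simp only [if_neg hc]
            rw [ih (r + pvRunLen v threshold (v.length - r) r) (r + pvRunLen v threshold (v.length - r) r)
              starts ends hle (by omega)]
        · simp only [if_neg hw]
          rw [ih (r + pvRunLen v threshold (v.length - r) r) l starts ends hle (by omega)]
    · rw [dif_neg h]
      have hrn : r = v.length := by omega
      have h1 : v.length + 1 - r = 1 := by omega
      rw [h1, pvRuns, dif_neg h]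
      simp only [pvProcRuns, hrn]

-- ===== VERDICT (by name: the statement is the Claim_ definition above) =====
theorem FindVSplitPos_spec : Claim_equal_FindVSplitPos := by
  intro v threshold width charctorWidth _
  unfold Spec_FindVSplitPos FindVSplitPos FindVSplitPos_alt
  rw [pvMain v threshold width charctorWidth (v.length + 1) 0 0 [] [] (Nat.zero_le _) (by omega)]
  simp only [Nat.sub_zero]
  split <;> rfl
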